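-- pv_equiv track=rewrite | github.com/Aarav2709/DecryptionToolkeet | DecryptionToolkeet/decoders/beaufort_decoder.py | _decode_beaufort
-- ===== SOURCE A (Python) =====
-- def _decode_beaufort(text: str, key: str) -> str:
--     key = key.upper()
--     result = []
--     key_index = 0
--
--     for char in text:
--         if char.isalpha():
--             # Beaufort formula: plaintext = key - ciphertext (mod 26)
--             key_char = key[key_index % len(key)]
--             key_val = ord(key_char) - ord('A')
--             cipher_val = ord(char) - ord('A')
--
--             # Beaufort decryption
--             plain_val = (key_val - cipher_val) % 26
--             result.append(chr(plain_val + ord('A')))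
--
--             key_index += 1
--         else:
--             result.append(char)
--
--     return ''.join(result)
-- ===== SOURCE B (Python) =====
-- def _decode_beaufort(text: str, key: str) -> str:
--     # Key-position-major ("stripe") traversal: the j-th key letter independently
--     # decrypts every len(key)-th alphabetic character, writing into a mutable copy;
--     # non-letters are never touched.
--     result = list(text)
--     positions = [i for i, ch in enumerate(text) if ch.isalpha()]
--     ku = key.upper()
--     for j, kch in enumerate(ku):
--         kv = ord(kch) - ord('A')
--         for r in range(j, len(positions), len(ku)):
--             idx = positions[r]
--             result[idx] = chr((kv - (ord(text[idx]) - ord('A'))) % 26 + ord('A'))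
--     return ''.join(result)
-- ===== Notes on version B (the rewrite author's own statement) =====
-- stated objective: alternative
-- what changed: A decrypts character-major in one pass threading a key counter; B decrypts key-position-major: it collects the alphabetic positions, then for each key letter j transforms every len(key)-th such position (stripe) into a mutable copy, relying on the writes being independent.
import Mathlib
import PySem

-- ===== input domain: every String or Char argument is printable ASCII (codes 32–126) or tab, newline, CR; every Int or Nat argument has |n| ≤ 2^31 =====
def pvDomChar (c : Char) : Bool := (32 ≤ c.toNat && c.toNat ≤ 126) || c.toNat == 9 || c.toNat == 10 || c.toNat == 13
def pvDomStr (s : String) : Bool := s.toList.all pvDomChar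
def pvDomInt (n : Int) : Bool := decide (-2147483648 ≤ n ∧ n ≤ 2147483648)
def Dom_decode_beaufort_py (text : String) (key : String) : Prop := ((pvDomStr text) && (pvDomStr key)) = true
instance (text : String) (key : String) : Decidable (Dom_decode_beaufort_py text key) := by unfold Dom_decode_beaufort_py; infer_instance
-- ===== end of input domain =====

-- B replaces A's character-major pass (one key counter threaded over the text) by a
-- key-position-major traversal: collect the alphabetic positions, then each key letter j
-- transforms every len(key)-th of them independently (objective: alternative; same cost).

-- The Beaufort letter formula both Pythons compute verbatim: chr((kv - (ord(c) - 65)) % 26 + 65).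
def pvTrK (kv : Int) (c : Char) : Char :=
  Char.ofNat (PySem.Int.mod (kv - ((c.toNat : Int) - 65)) 26 + 65).toNat

-- ===== PORT A =====
-- A's single loop over the text, threading the key counter ki.
-- The pyGetD default 'A' is a totality guard only: Pre_ guarantees keyU ≠ [] whenever it is reached.
def pvGoA (keyU : List Char) (ki : Int) : List Char → List Char
  | [] => []
  | c :: cs =>
    if PySem.Chars.isalpha c then
      pvTrK ((PySem.List.pyGetD keyU (PySem.Int.mod ki (keyU.length : Int)) 'A').toNat - 65) c
        :: pvGoA keyU (ki + 1) cs
    else c :: pvGoA keyU ki cs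

def decode_beaufort_py (text : String) (key : String) : String :=
  String.ofList (pvGoA (PySem.Chars.upper key.toList) 0 text.toList)

-- ===== PORT B =====
-- phase 1 of Source B: positions = [i for i, ch in enumerate(text) if ch.isalpha()]
def pvIdxs (cs : List Char) : List Int :=
  (PySem.List.enumerate cs 0).filterMap
    (fun p => if PySem.Chars.isalpha p.2 then some p.1 else none)

-- phase 2 of Source B: for j, kch in enumerate(ku): for r in range(j, len(positions), len(ku)):
--   result[positions[r]] = chr((kv - (ord(text[positions[r]]) - 65)) % 26 + 65)
-- (pyGetD defaults are totality guards: r and positions[r] are always in range)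
def decode_beaufort_py_alt (text : String) (key : String) : String :=
  let cs := text.toList
  let ps := pvIdxs cs
  let ku := PySem.Chars.upper key.toList
  String.ofList ((PySem.List.enumerate ku 0).foldl
    (fun res q =>
      (PySem.List.pyRange q.1 (ps.length : Int) (ku.length : Int)).foldl
        (fun res r =>
          let idx := PySem.List.pyGetD ps r (-1)
          res.set idx.toNat (pvTrK ((q.2.toNat : Int) - 65) (PySem.List.pyGetD cs idx 'A')))
        res)
    cs)

-- ===== PRECONDITION & SPEC =====
-- Pre_ excludes exactly the inputs where A raises ZeroDivisionError:
-- an empty key together with a text containing at least one alphabetic character.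
def Pre_decode_beaufort_py (text : String) (key : String) : Prop :=
  key ≠ "" ∨ (text.toList.all (fun c => ! PySem.Chars.isalpha c)) = true
instance (text : String) (key : String) : Decidable (Pre_decode_beaufort_py text key) := by
  unfold Pre_decode_beaufort_py; infer_instance

def pvWitness_decode_beaufort_py : String × String := ("Hello, World!", "Key")

def Spec_decode_beaufort_py (text : String) (key : String) (out : String) : Prop :=
  out = decode_beaufort_py_alt text key
instance (text : String) (key : String) (out : String) : Decidable (Spec_decode_beaufort_py text key out) := by
  unfold Spec_decode_beaufort_py; infer_instance

-- ===== CLAIM (what is proved, stated in full; the proofs are below) =====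
def Claim_equal_decode_beaufort_py : Prop := ∀ (text : String) (key : String), Dom_decode_beaufort_py text key → Pre_decode_beaufort_py text key → Spec_decode_beaufort_py text key (decode_beaufort_py text key)

-- ===== LEMMAS AND PROOFS =====

-- The one set/lookup action both folds perform, on a (rank, position) pair.
def pvAct (keyU cs : List Char) (res : List Char) (p : Int × Int) : List Char :=
  res.set p.2.toNat
    (pvTrK ((PySem.List.pyGetD keyU (PySem.Int.mod p.1 (keyU.length : Int)) 'A').toNat - 65)
      (PySem.List.pyGetD cs p.2 'A'))

-- rank-pair list B's nested loops traverse
def pvPB (keyU : List Char) (ps : List Int) : List (Int × Int) :=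
  (PySem.List.enumerate keyU 0).flatMap
    (fun q => (PySem.List.pyRange q.1 (ps.length : Int) (keyU.length : Int)).map
      (fun r => (r, PySem.List.pyGetD ps r (-1))))

theorem pvIdxsFrom_shift (cs : List Char) (s : Int) :
    (PySem.List.enumerate cs s).filterMap
      (fun p => if PySem.Chars.isalpha p.2 then some p.1 else none)
    = ((PySem.List.enumerate cs 0).filterMap
      (fun p => if PySem.Chars.isalpha p.2 then some p.1 else none)).map (· + s) := by
  induction cs generalizing s with
  | nil => simp [PySem.List.enumerate_nil]
  | cons c cs ih =>
    simp only [PySem.List.enumerate_cons, List.filterMap_cons]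
    rw [ih (s + 1), ih (0 + 1)]
    by_cases h : PySem.Chars.isalpha c <;>
      simp [h, List.map_map] <;> (intros; omega)

theorem pvIdxs_cons (c : Char) (cs : List Char) :
    pvIdxs (c :: cs)
    = (if PySem.Chars.isalpha c then [(0 : Int)] else []) ++ (pvIdxs cs).map (· + 1) := by
  unfold pvIdxs
  rw [PySem.List.enumerate_cons, List.filterMap_cons, pvIdxsFrom_shift cs (0 + 1)]
  by_cases h : PySem.Chars.isalpha c <;> simp [h]

theorem pvIdxs_nonneg (cs : List Char) : ∀ idx ∈ pvIdxs cs, 0 ≤ idx := by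
  intro idx h
  unfold pvIdxs at h
  obtain ⟨p, hmem, hpick⟩ := List.mem_filterMap.mp h
  obtain ⟨k, hk, hp⟩ := (PySem.List.mem_enumerate_iff _ _ _).mp hmem
  by_cases ha : PySem.Chars.isalpha (cs[k]) <;> simp [hp, ha] at hpick
  omega

theorem pvIdxs_pairwise (cs : List Char) : (pvIdxs cs).Pairwise (· < ·) := by
  induction cs with
  | nil => simp [pvIdxs, PySem.List.enumerate_nil]
  | cons c cs ih =>
    rw [pvIdxs_cons]
    have hmap : ((pvIdxs cs).map (· + 1)).Pairwise (· < ·) :=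
      List.Pairwise.map _ (by intro a b h; omega) ih
    by_cases h : PySem.Chars.isalpha c
    · simp only [h, if_true, List.singleton_append, List.pairwise_cons]
      refine ⟨?_, hmap⟩
      intro x hx
      obtain ⟨y, hy, rfl⟩ := List.mem_map.mp hx
      have := pvIdxs_nonneg cs y hy; omega
    · simpa [h] using hmap

theorem pvIdxs_nodup (cs : List Char) : (pvIdxs cs).Nodup :=
  (pvIdxs_pairwise cs).imp (fun h => by omega)

theorem pvEnumerate_map_snd {α β : Type} (f : α → β) (l : List α) (s : Int) :
    PySem.List.enumerate (l.map f) s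
    = (PySem.List.enumerate l s).map (fun p => (p.1, f p.2)) := by
  induction l generalizing s with
  | nil => simp [PySem.List.enumerate_nil]
  | cons x l ih => simp [PySem.List.enumerate_cons, ih]

theorem pvShift (keyU : List Char) (P : List (Int × Int)) (hP : ∀ p ∈ P, 0 ≤ p.2)
    (x c₀ : Char) (res cs₀ : List Char) :
    (P.map (fun p => (p.1, p.2 + 1))).foldl (pvAct keyU (c₀ :: cs₀)) (x :: res)
    = x :: P.foldl (pvAct keyU cs₀) res := by
  induction P generalizing x res with
  | nil => simp
  | cons p P ih =>
    have h0 : 0 ≤ p.2 := hP p (by simp)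
    simp only [List.map_cons, List.foldl_cons]
    have hget : PySem.List.pyGetD (c₀ :: cs₀) (p.2 + 1) 'A' = PySem.List.pyGetD cs₀ p.2 'A' := by
      obtain ⟨n, hn⟩ : ∃ n : Nat, p.2 = (n : Int) := ⟨p.2.toNat, by omega⟩
      rw [hn]
      simp [PySem.List.pyGetD, PySem.List.pyGet?_cons_succ]
    have hact : pvAct keyU (c₀ :: cs₀) (x :: res) (p.1, p.2 + 1)
        = x :: pvAct keyU cs₀ res p := by
      unfold pvAct
      rw [hget, show (p.2 + 1).toNat = p.2.toNat + 1 by omega]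
      rfl
    rw [hact]
    exact ih (fun q hq => hP q (List.mem_cons_of_mem _ hq)) x _

theorem pvEnumIdx_nonneg (cs : List Char) (s : Int) :
    ∀ p ∈ PySem.List.enumerate (pvIdxs cs) s, 0 ≤ p.2 := by
  intro p hp
  obtain ⟨k, hk, rfl⟩ := (PySem.List.mem_enumerate_iff _ _ _).mp hp
  exact pvIdxs_nonneg cs _ (List.getElem_mem hk)

theorem pvGoA_eq_foldl (keyU : List Char) (cs : List Char) (ki : Int) :
    pvGoA keyU ki cs
    = (PySem.List.enumerate (pvIdxs cs) ki).foldl (pvAct keyU cs) cs := by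
  induction cs generalizing ki with
  | nil => simp [pvGoA, pvIdxs, PySem.List.enumerate_nil]
  | cons c cs ih =>
    rw [pvIdxs_cons]
    by_cases h : PySem.Chars.isalpha c
    · simp only [h, if_true, List.singleton_append, PySem.List.enumerate_cons, List.foldl_cons]
      have h1 : pvAct keyU (c :: cs) (c :: cs) (ki, 0) =
          pvTrK ((PySem.List.pyGetD keyU (PySem.Int.mod ki (keyU.length : Int)) 'A').toNat - 65) c
            :: cs := by
        unfold pvAct
        simp [PySem.List.pyGetD_zero_cons]
      rw [h1, pvEnumerate_map_snd, show (fun (p : Int × Int) => (p.1, (fun x => x + 1) p.2))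
            = (fun (p : Int × Int) => (p.1, p.2 + 1)) from rfl,
        pvShift keyU _ (pvEnumIdx_nonneg cs (ki + 1))]
      simp [pvGoA, h, ih]
    · simp only [h, Bool.false_eq_true, if_false, List.nil_append]
      rw [pvEnumerate_map_snd, show (fun (p : Int × Int) => (p.1, (fun x => x + 1) p.2))
            = (fun (p : Int × Int) => (p.1, p.2 + 1)) from rfl,
        pvShift keyU _ (pvEnumIdx_nonneg cs ki)]
      simp [pvGoA, h, ih]

-- A's key lookup index key_index % len(key) equals the stripe number j of the rank.
theorem pvModEq {L r j : Int} (hL : 0 < L) (hj0 : 0 ≤ j) (hjL : j < L)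
    (hdvd : L ∣ r - j) : PySem.Int.mod r L = j := by
  rw [PySem.Int.mod_eq_emod_of_pos hL,
    show r % L = j % L from
      Int.emod_eq_emod_iff_emod_sub_eq_zero.mpr (Int.emod_eq_zero_of_dvd hdvd),
    Int.emod_eq_of_lt hj0 hjL]

theorem pvLen_pos_of_ne_nil (keyU : List Char) (hne : keyU ≠ []) : 0 < (keyU.length : Int) := by
  have : keyU.length ≠ 0 := fun h => hne (List.length_eq_zero_iff.mp h)
  omega

theorem pvAlt_eq_foldl (keyU cs : List Char) (hne : keyU ≠ []) :
    (PySem.List.enumerate keyU 0).foldl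
      (fun res q =>
        (PySem.List.pyRange q.1 ((pvIdxs cs).length : Int) (keyU.length : Int)).foldl
          (fun res r =>
            let idx := PySem.List.pyGetD (pvIdxs cs) r (-1)
            res.set idx.toNat (pvTrK ((q.2.toNat : Int) - 65) (PySem.List.pyGetD cs idx 'A')))
          res)
      cs
    = (pvPB keyU (pvIdxs cs)).foldl (pvAct keyU cs) cs := by
  have hL := pvLen_pos_of_ne_nil keyU hne
  rw [pvPB, List.foldl_flatMap]
  apply PySem.List.foldl_congr_mem
  intro acc q hq
  rw [List.foldl_map]
  apply PySem.List.foldl_congr_mem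
  intro res r hr
  obtain ⟨k, hk, rfl⟩ := (PySem.List.mem_enumerate_iff _ _ _).mp hq
  obtain ⟨hle, hlt, hdvd⟩ := (PySem.List.mem_pyRange_iff_of_pos hL r).mp hr
  have hmod : PySem.Int.mod r (keyU.length : Int) = ((k : Int)) :=
    pvModEq hL (by omega) (by exact_mod_cast hk) (by simpa using hdvd)
  simp only [pvAct, hmod, PySem.List.pyGetD_natCast, List.getD_eq_getElem keyU 'A' hk]

theorem pvNodup_pyRange_pos (a b s : Int) (hs : 0 < s) : (PySem.List.pyRange a b s).Nodup := by
  rw [PySem.List.pyRange_of_pos a b hs]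
  refine List.Nodup.map ?_ List.nodup_range
  intro x y h
  have h2 : s * (x : Int) = s * (y : Int) := by linarith
  exact_mod_cast mul_left_cancel₀ (ne_of_gt hs) h2

theorem pvPerm (keyU cs : List Char) (hne : keyU ≠ []) :
    (PySem.List.enumerate (pvIdxs cs) 0).Perm (pvPB keyU (pvIdxs cs)) := by
  have hL := pvLen_pos_of_ne_nil keyU hne
  set ps := pvIdxs cs with hps
  have hnd1 : (PySem.List.enumerate ps 0).Nodup :=
    (PySem.List.pairwise_lt_enumerate ps 0).imp
      (fun {a b} h he => absurd (he ▸ h) (lt_irrefl _))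
  have hnd2 : (pvPB keyU ps).Nodup := by
    rw [pvPB, List.nodup_flatMap]
    constructor
    · intro q _
      refine List.Nodup.map ?_ (pvNodup_pyRange_pos _ _ _ hL)
      intro x y h
      exact congrArg Prod.fst h
    · refine (PySem.List.pairwise_lt_enumerate keyU 0).imp_of_mem ?_
      intro q q' hq hq' hlt p hp hp'
      obtain ⟨r, hr, rfl⟩ := List.mem_map.mp hp
      obtain ⟨r', hr', he⟩ := List.mem_map.mp hp'
      have hrr : r' = r := congrArg Prod.fst he
      rw [hrr] at hr'
      obtain ⟨k, hk, rfl⟩ := (PySem.List.mem_enumerate_iff _ _ _).mp hq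
      obtain ⟨k', hk', rfl⟩ := (PySem.List.mem_enumerate_iff _ _ _).mp hq'
      obtain ⟨hle, _, hdvd⟩ := (PySem.List.mem_pyRange_iff_of_pos hL r).mp hr
      obtain ⟨hle', _, hdvd'⟩ := (PySem.List.mem_pyRange_iff_of_pos hL r).mp hr'
      have e1 := pvModEq (j := (k : Int)) hL (by omega) (by exact_mod_cast hk) (by simpa using hdvd)
      have e2 := pvModEq (j := (k' : Int)) hL (by omega) (by exact_mod_cast hk') (by simpa using hdvd')
      rw [e1] at e2
      simp at hlt e2
      omega
  refine (List.perm_ext_iff_of_nodup hnd1 hnd2).mpr ?_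
  intro p
  constructor
  · intro hp
    obtain ⟨k, hk, rfl⟩ := (PySem.List.mem_enumerate_iff _ _ _).mp hp
    rw [pvPB, List.mem_flatMap]
    set L := (keyU.length : Int)
    have hj0 : 0 ≤ (k : Int) % L := Int.emod_nonneg _ (by omega)
    have hjL : (k : Int) % L < L := Int.emod_lt_of_pos _ hL
    have hjle : (k : Int) % L ≤ (k : Int) := by
      have hd : L * ((k : Int) / L) + (k : Int) % L = (k : Int) := Int.mul_ediv_add_emod _ _
      have hdn : 0 ≤ L * ((k : Int) / L) :=
        mul_nonneg (by omega) (Int.ediv_nonneg (by omega) (by omega))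
      omega
    refine ⟨(0 + ((k : Int) % L).toNat, keyU[((k : Int) % L).toNat]'?_), ?_, ?_⟩
    · omega
    · exact (PySem.List.mem_enumerate_iff _ _ _).mpr ⟨((k : Int) % L).toNat, by omega, rfl⟩
    · rw [List.mem_map]
      refine ⟨(k : Int), ?_, ?_⟩
      · refine (PySem.List.mem_pyRange_iff_of_pos hL _).mpr ⟨by omega, by exact_mod_cast hk, ?_⟩
        have hd : L * ((k : Int) / L) + (k : Int) % L = (k : Int) := Int.mul_ediv_add_emod _ _
        exact ⟨(k : Int) / L, by omega⟩
      · rw [PySem.List.pyGetD_eq_getElem ps (-1) (by omega) (by exact_mod_cast hk)]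
        simp
  · intro hp
    rw [pvPB, List.mem_flatMap] at hp
    obtain ⟨q, hq, hp⟩ := hp
    obtain ⟨r, hr, rfl⟩ := List.mem_map.mp hp
    obtain ⟨k, hk, rfl⟩ := (PySem.List.mem_enumerate_iff _ _ _).mp hq
    obtain ⟨hle, hlt, _⟩ := (PySem.List.mem_pyRange_iff_of_pos hL r).mp hr
    have hr0 : 0 ≤ r := by omega
    have hrn : r.toNat < ps.length := by omega
    refine (PySem.List.mem_enumerate_iff _ _ _).mpr ⟨r.toNat, hrn, ?_⟩
    rw [PySem.List.pyGetD_eq_getElem ps (-1) hr0 (by omega)]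
    have : (0 : Int) + (r.toNat : Int) = r := by omega
    rw [this]

theorem pvComm (keyU cs : List Char) :
    ∀ x ∈ PySem.List.enumerate (pvIdxs cs) 0, ∀ y ∈ PySem.List.enumerate (pvIdxs cs) 0,
      ∀ z, pvAct keyU cs (pvAct keyU cs z x) y = pvAct keyU cs (pvAct keyU cs z y) x := by
  intro x hx y hy z
  obtain ⟨kx, hkx, rfl⟩ := (PySem.List.mem_enumerate_iff _ _ _).mp hx
  obtain ⟨ky, hky, rfl⟩ := (PySem.List.mem_enumerate_iff _ _ _).mp hy
  by_cases hk : kx = ky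
  · subst hk; rfl
  · have hne2 : (pvIdxs cs)[kx] ≠ (pvIdxs cs)[ky] := by
      intro he
      exact hk ((List.Nodup.getElem_inj_iff (pvIdxs_nodup cs)).mp he)
    have h0x : 0 ≤ (pvIdxs cs)[kx] := pvIdxs_nonneg cs _ (List.getElem_mem hkx)
    have h0y : 0 ≤ (pvIdxs cs)[ky] := pvIdxs_nonneg cs _ (List.getElem_mem hky)
    exact List.set_comm _ _ (by omega)

theorem pvIdxs_nil_of_noalpha (cs : List Char)
    (h : (cs.all (fun c => ! PySem.Chars.isalpha c)) = true) : pvIdxs cs = [] := by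
  induction cs with
  | nil => simp [pvIdxs, PySem.List.enumerate_nil]
  | cons c cs ih =>
    rw [List.all_cons, Bool.and_eq_true] at h
    rw [pvIdxs_cons, ih h.2]
    have : PySem.Chars.isalpha c = false := by
      cases hc : PySem.Chars.isalpha c
      · rfl
      · rw [hc] at h; simp at h
    simp [this]

-- ===== VERDICT (by name: the statements are the Claim_ definitions above) =====
theorem decode_beaufort_py_spec : Claim_equal_decode_beaufort_py := by
  intro text key hdom hpre
  unfold Spec_decode_beaufort_py decode_beaufort_py decode_beaufort_py_alt
  simp only []
  congr 1
  by_cases hk : key.toList = []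
  · have hku : PySem.Chars.upper key.toList = [] := by rw [hk]; rfl
    have hall : (text.toList.all (fun c => ! PySem.Chars.isalpha c)) = true := by
      rcases hpre with h | h
      · exact absurd (String.toList_eq_nil_iff.mp hk) h
      · exact h
    rw [hku, pvGoA_eq_foldl, pvIdxs_nil_of_noalpha _ hall]
    simp [PySem.List.enumerate_nil]
  · have hne : PySem.Chars.upper key.toList ≠ [] := by
      intro h
      have := congrArg List.length h
      simp [PySem.Chars.upper] at this
      exact hk (by simp [this])
    rw [pvGoA_eq_foldl,
      (pvPerm (PySem.Chars.upper key.toList) text.toList hne).foldl_eq'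
        (pvComm (PySem.Chars.upper key.toList) text.toList) text.toList,
      pvAlt_eq_foldl _ _ hne]
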